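-- pv_equiv track=rewrite | github.com/StatStud/nl-parsing | final.py | extract_top_strings
-- ===== SOURCE A (Python) =====
-- def extract_top_strings(list_of_dicts):
--     """
--     Applied after running self.get_embedding_matches().
--     Extracts the top 1 values (instead of top_k) final
--     node candidate for each sentence.
--
--     Parameters:
--     -----------
--     list_of_dicts : List[Dict(Tuple)]
--         Consolidated list of FAISS results. See output for self.get_embedding_matches()
--
--     Returns:
--     --------
--     list[Str]
--         A final list of entities that represents the best
--         entity linking for the entire context
--     """
--     top_k = 1
--     top_strings = {}
--     for dictionary in list_of_dicts:
--         for key, value in dictionary.items():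
--             if key in top_strings:
--                 top_strings[key].extend([t[0] for t in value[:top_k]])
--             else:
--                 top_strings[key] = [t[0] for t in value[:top_k]]
--     merged_list = list(set([s for sublist in top_strings.values() for s in sublist]))
--     return merged_list
-- ===== SOURCE B (Python) =====
-- def extract_top_strings(list_of_dicts):
--     result = set()
--     for dictionary in list_of_dicts:
--         for value in dictionary.values():
--             if value:
--                 result.add(value[0][0])
--     return sorted(result)
-- ===== Notes on version B (the rewrite author's own statement) =====
-- stated objective: simpler
-- what changed: B drops A's two phases (build a key-grouped dict of top-1 string lists, then flatten all its values and deduplicate with set()) and instead adds each non-empty value's top string straight to a set in one pass, returning the deduplicated strings sorted (deterministic, where A's list(set(...)) order is hash-arbitrary; the result is compared as a set).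
import Mathlib
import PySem

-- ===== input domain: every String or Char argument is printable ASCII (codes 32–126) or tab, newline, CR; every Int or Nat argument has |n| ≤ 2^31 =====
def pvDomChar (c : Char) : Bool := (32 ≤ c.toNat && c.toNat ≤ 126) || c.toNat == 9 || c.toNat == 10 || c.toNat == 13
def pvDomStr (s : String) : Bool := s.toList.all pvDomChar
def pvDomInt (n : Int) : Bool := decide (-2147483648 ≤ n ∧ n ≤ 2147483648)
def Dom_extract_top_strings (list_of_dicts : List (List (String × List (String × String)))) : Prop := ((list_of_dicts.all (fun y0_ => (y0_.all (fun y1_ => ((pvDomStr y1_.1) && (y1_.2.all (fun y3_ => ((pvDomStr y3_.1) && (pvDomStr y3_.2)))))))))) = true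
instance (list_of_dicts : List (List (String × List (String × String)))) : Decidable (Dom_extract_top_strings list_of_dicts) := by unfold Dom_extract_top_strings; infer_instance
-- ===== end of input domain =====

-- B replaces A's two phases (key-grouped dict, then flatten + set()) by one accumulation pass straight into
-- the set. Python's list(set(...)) iteration order is hash-arbitrary and the output is compared as a set;
-- both ports therefore render the final set as its sorted element list (B's Python sorts explicitly).

-- ===== PORT A =====
def extract_top_strings (list_of_dicts : List (List (String × List (String × String)))) : List String :=
  let top_k : Int := 1
  let top_strings : PySem.Dict String (List String) :=
    list_of_dicts.foldl (fun top_strings dictionary =>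
      dictionary.foldl (fun top_strings kv =>
        if top_strings.contains kv.1 then
          -- top_strings[key].extend([t[0] for t in value[:top_k]])
          top_strings.insert kv.1 (top_strings.getD kv.1 [] ++ (PySem.List.slice kv.2 none (some top_k)).map Prod.fst)
        else
          -- top_strings[key] = [t[0] for t in value[:top_k]]
          top_strings.insert kv.1 ((PySem.List.slice kv.2 none (some top_k)).map Prod.fst))
        top_strings)
      PySem.Dict.empty
  -- merged_list = list(set([s for sublist in top_strings.values() for s in sublist]));
  -- list(<set>) has no modelled order: rendered as the sorted element list (output compared as a set)
  let merged_list := PySem.Set.ofList (top_strings.values.flatMap (fun sublist => sublist))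
  PySem.List.sorted merged_list (fun s => s) false

-- ===== PORT B =====
def extract_top_strings_alt (list_of_dicts : List (List (String × List (String × String)))) : List String :=
  let result : PySem.Set String :=
    list_of_dicts.foldl (fun result dictionary =>
      dictionary.foldl (fun result kv =>
        match kv.2 with
        | [] => result                              -- if value: (empty value → skip)
        | t :: _ => PySem.Set.add result t.1)       -- result.add(value[0][0])
        result)
      PySem.Set.empty
  PySem.List.sorted result (fun s => s) false      -- return sorted(result)

-- ===== PRECONDITION & SPEC =====
def Spec_extract_top_strings (list_of_dicts : List (List (String × List (String × String)))) (out : List String) : Prop := out = extract_top_strings_alt list_of_dicts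
instance (list_of_dicts : List (List (String × List (String × String)))) (out : List String) : Decidable (Spec_extract_top_strings list_of_dicts out) := by unfold Spec_extract_top_strings; infer_instance

-- ===== CLAIM (what is proved, stated in full; the proofs are below) =====
def Claim_equal_extract_top_strings : Prop := ∀ (list_of_dicts : List (List (String × List (String × String)))), Dom_extract_top_strings list_of_dicts → Spec_extract_top_strings list_of_dicts (extract_top_strings list_of_dicts)

-- ===== LEMMAS AND PROOFS =====

-- the strings both programs collect: heads of non-empty value lists
def pvTop (l : List (List (String × List (String × String)))) (x : String) : Prop :=
  ∃ d ∈ l, ∃ kv ∈ d, ∃ t ts, kv.2 = t :: ts ∧ x = t.1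

-- A's dict-building step (definitionally the lambda inside extract_top_strings)
def pvStepA (d : PySem.Dict String (List String)) (kv : String × List (String × String)) : PySem.Dict String (List String) :=
  if d.contains kv.1 then
    d.insert kv.1 (d.getD kv.1 [] ++ (PySem.List.slice kv.2 none (some 1)).map Prod.fst)
  else
    d.insert kv.1 ((PySem.List.slice kv.2 none (some 1)).map Prod.fst)

-- B's set-building step (definitionally the lambda inside extract_top_strings_alt)
def pvStepB (s : PySem.Set String) (kv : String × List (String × String)) : PySem.Set String :=
  match kv.2 with
  | [] => s
  | t :: _ => PySem.Set.add s t.1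

theorem pv_mem_newOf (kv : String × List (String × String)) (x : String) :
    x ∈ (PySem.List.slice kv.2 none (some 1)).map Prod.fst ↔ ∃ t ts, kv.2 = t :: ts ∧ x = t.1 := by
  obtain ⟨k, v⟩ := kv
  cases v with
  | nil => simp [PySem.List.slice]
  | cons t ts => simp [PySem.List.slice]

theorem pv_mem_flat_iff (d : PySem.Dict String (List String)) (x : String) :
    x ∈ d.values.flatMap (fun s => s) ↔ ∃ p ∈ d.items, x ∈ p.2 := by
  show x ∈ (d.items.map Prod.snd).flatMap (fun s => s) ↔ _
  simp
  aesop

theorem pvStepA_keys_nodup (d : PySem.Dict String (List String)) (kv : String × List (String × String))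
    (h : d.keys.Nodup) : (pvStepA d kv).keys.Nodup := by
  unfold pvStepA; split_ifs <;> exact PySem.Dict.nodup_keys_insert d _ _ h

theorem pvStepA_mem (d : PySem.Dict String (List String)) (kv : String × List (String × String))
    (h : d.keys.Nodup) (x : String) :
    x ∈ (pvStepA d kv).values.flatMap (fun s => s) ↔
      x ∈ d.values.flatMap (fun s => s) ∨ x ∈ (PySem.List.slice kv.2 none (some 1)).map Prod.fst := by
  unfold pvStepA
  by_cases hc : d.contains kv.1
  · rw [if_pos hc]
    rw [pv_mem_flat_iff, pv_mem_flat_iff]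
    rw [PySem.Dict.items_insert_of_contains d _ hc]
    obtain ⟨pk, hpk, hk⟩ : ∃ p ∈ d.items, p.1 = kv.1 := by
      have := (PySem.Dict.contains_iff_mem_keys d kv.1).mp hc
      have : kv.1 ∈ d.items.map Prod.fst := this
      simpa [List.mem_map, eq_comm] using this
    have hget : d.get? kv.1 = some pk.2 := by
      have := PySem.Dict.get?_of_mem_items d (k := pk.1) (v := pk.2) (by simpa using hpk) h
      rwa [hk] at this
    have hgetD : d.getD kv.1 [] = pk.2 := by
      rw [PySem.Dict.getD_eq_get?_getD, hget]; rfl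
    constructor
    · rintro ⟨p', hp', hx⟩
      rw [List.mem_map] at hp'
      obtain ⟨p, hp, rfl⟩ := hp'
      by_cases hpk1 : (p.1 == kv.1) = true
      · rw [if_pos hpk1] at hx
        simp only [List.mem_append] at hx
        rcases hx with hx | hx
        · rw [hgetD] at hx
          have hp2 : d.get? p.1 = some p.2 := PySem.Dict.get?_of_mem_items d (by simpa using hp) h
          have : p.1 = kv.1 := by simpa using hpk1
          rw [this, hget] at hp2
          exact Or.inl ⟨p, hp, by rw [Option.some_inj] at hp2; exact hp2 ▸ hx⟩
        · exact Or.inr hx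
      · rw [if_neg hpk1] at hx
        exact Or.inl ⟨p, hp, hx⟩
    · rintro (⟨p, hp, hx⟩ | hx)
      · by_cases hpk1 : (p.1 == kv.1) = true
        · refine ⟨(kv.1, d.getD kv.1 [] ++ (PySem.List.slice kv.2 none (some 1)).map Prod.fst), ?_, ?_⟩
          · rw [List.mem_map]
            exact ⟨p, hp, by rw [if_pos hpk1]⟩
          · have hp2 : d.get? p.1 = some p.2 := PySem.Dict.get?_of_mem_items d (by simpa using hp) h
            have he : p.1 = kv.1 := by simpa using hpk1
            rw [he, hget] at hp2
            rw [Option.some_inj] at hp2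
            simp only [List.mem_append]
            exact Or.inl (by rw [hgetD]; exact hp2.symm ▸ hx)
        · exact ⟨p, List.mem_map.mpr ⟨p, hp, by rw [if_neg hpk1]⟩, hx⟩
      · refine ⟨(kv.1, d.getD kv.1 [] ++ (PySem.List.slice kv.2 none (some 1)).map Prod.fst), ?_, ?_⟩
        · rw [List.mem_map]
          exact ⟨pk, hpk, by rw [if_pos (by simpa using hk)]⟩
        · simp only [List.mem_append]; exact Or.inr hx
  · rw [if_neg (by simpa using hc)]
    rw [pv_mem_flat_iff, pv_mem_flat_iff]
    rw [PySem.Dict.items_insert_of_not_contains d _ (by simpa using hc)]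
    constructor
    · rintro ⟨p, hp, hx⟩
      rcases List.mem_append.mp hp with hp | hp
      · exact Or.inl ⟨p, hp, hx⟩
      · simp only [List.mem_singleton] at hp
        subst hp; exact Or.inr hx
    · rintro (⟨p, hp, hx⟩ | hx)
      · exact ⟨p, List.mem_append.mpr (Or.inl hp), hx⟩
      · exact ⟨_, List.mem_append.mpr (Or.inr (List.mem_singleton.mpr rfl)), hx⟩

theorem pv_innerA (dict : List (String × List (String × String))) (d : PySem.Dict String (List String))
    (h : d.keys.Nodup) :
    (dict.foldl pvStepA d).keys.Nodup ∧
    ∀ x, x ∈ (dict.foldl pvStepA d).values.flatMap (fun s => s) ↔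
      x ∈ d.values.flatMap (fun s => s) ∨ ∃ kv ∈ dict, ∃ t ts, kv.2 = t :: ts ∧ x = t.1 := by
  induction dict generalizing d with
  | nil => simpa using h
  | cons kv rest ih =>
    obtain ⟨hn, hm⟩ := ih (pvStepA d kv) (pvStepA_keys_nodup d kv h)
    refine ⟨hn, fun x => ?_⟩
    rw [List.foldl_cons, hm x, pvStepA_mem d kv h x, pv_mem_newOf]
    constructor
    · rintro ((hx | hx) | hx)
      · exact Or.inl hx
      · exact Or.inr ⟨kv, List.mem_cons_self, hx⟩
      · obtain ⟨kv', hkv', hx⟩ := hx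
        exact Or.inr ⟨kv', List.mem_cons_of_mem _ hkv', hx⟩
    · rintro (hx | ⟨kv', hkv', hx⟩)
      · exact Or.inl (Or.inl hx)
      · rcases List.mem_cons.mp hkv' with rfl | hkv'
        · exact Or.inl (Or.inr hx)
        · exact Or.inr ⟨kv', hkv', hx⟩

theorem pv_outerA (l : List (List (String × List (String × String)))) (d : PySem.Dict String (List String))
    (h : d.keys.Nodup) :
    (l.foldl (fun d dict => dict.foldl pvStepA d) d).keys.Nodup ∧
    ∀ x, x ∈ (l.foldl (fun d dict => dict.foldl pvStepA d) d).values.flatMap (fun s => s) ↔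
      x ∈ d.values.flatMap (fun s => s) ∨ pvTop l x := by
  induction l generalizing d with
  | nil => simp [pvTop]; exact h
  | cons dict rest ih =>
    obtain ⟨hn1, hm1⟩ := pv_innerA dict d h
    obtain ⟨hn, hm⟩ := ih (dict.foldl pvStepA d) hn1
    refine ⟨hn, fun x => ?_⟩
    rw [List.foldl_cons, hm x, hm1 x]
    unfold pvTop
    constructor
    · rintro ((hx | hx) | hx)
      · exact Or.inl hx
      · exact Or.inr ⟨dict, List.mem_cons_self, hx⟩
      · obtain ⟨d', hd', hx⟩ := hx
        exact Or.inr ⟨d', List.mem_cons_of_mem _ hd', hx⟩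
    · rintro (hx | ⟨d', hd', hx⟩)
      · exact Or.inl (Or.inl hx)
      · rcases List.mem_cons.mp hd' with rfl | hd'
        · exact Or.inl (Or.inr hx)
        · exact Or.inr ⟨d', hd', hx⟩

theorem pvStepB_nodup (s : PySem.Set String) (kv : String × List (String × String))
    (h : List.Nodup s) : List.Nodup (pvStepB s kv) := by
  unfold pvStepB
  cases kv.2 with
  | nil => exact h
  | cons t ts => exact PySem.Set.nodup_add s t.1 h

theorem pvStepB_mem (s : PySem.Set String) (kv : String × List (String × String)) (x : String) :
    x ∈ pvStepB s kv ↔ x ∈ s ∨ ∃ t ts, kv.2 = t :: ts ∧ x = t.1 := by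
  unfold pvStepB
  obtain ⟨k, v⟩ := kv
  cases v with
  | nil => simp
  | cons t ts => rw [PySem.Set.mem_add]; simp

theorem pv_innerB (dict : List (String × List (String × String))) (s : PySem.Set String)
    (h : List.Nodup s) :
    List.Nodup (dict.foldl pvStepB s) ∧
    ∀ x, x ∈ dict.foldl pvStepB s ↔ x ∈ s ∨ ∃ kv ∈ dict, ∃ t ts, kv.2 = t :: ts ∧ x = t.1 := by
  induction dict generalizing s with
  | nil => simpa using h
  | cons kv rest ih =>
    obtain ⟨hn, hm⟩ := ih (pvStepB s kv) (pvStepB_nodup s kv h)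
    refine ⟨hn, fun x => ?_⟩
    rw [List.foldl_cons, hm x, pvStepB_mem s kv x]
    constructor
    · rintro ((hx | hx) | hx)
      · exact Or.inl hx
      · exact Or.inr ⟨kv, List.mem_cons_self, hx⟩
      · obtain ⟨kv', hkv', hx⟩ := hx
        exact Or.inr ⟨kv', List.mem_cons_of_mem _ hkv', hx⟩
    · rintro (hx | ⟨kv', hkv', hx⟩)
      · exact Or.inl (Or.inl hx)
      · rcases List.mem_cons.mp hkv' with rfl | hkv'
        · exact Or.inl (Or.inr hx)
        · exact Or.inr ⟨kv', hkv', hx⟩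

theorem pv_outerB (l : List (List (String × List (String × String)))) (s : PySem.Set String)
    (h : List.Nodup s) :
    List.Nodup (l.foldl (fun s dict => dict.foldl pvStepB s) s) ∧
    ∀ x, x ∈ l.foldl (fun s dict => dict.foldl pvStepB s) s ↔ x ∈ s ∨ pvTop l x := by
  induction l generalizing s with
  | nil => simp [pvTop]; exact h
  | cons dict rest ih =>
    obtain ⟨hn1, hm1⟩ := pv_innerB dict s h
    obtain ⟨hn, hm⟩ := ih (dict.foldl pvStepB s) hn1
    refine ⟨hn, fun x => ?_⟩
    rw [List.foldl_cons, hm x, hm1 x]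
    unfold pvTop
    constructor
    · rintro ((hx | hx) | hx)
      · exact Or.inl hx
      · exact Or.inr ⟨dict, List.mem_cons_self, hx⟩
      · obtain ⟨d', hd', hx⟩ := hx
        exact Or.inr ⟨d', List.mem_cons_of_mem _ hd', hx⟩
    · rintro (hx | ⟨d', hd', hx⟩)
      · exact Or.inl (Or.inl hx)
      · rcases List.mem_cons.mp hd' with rfl | hd'
        · exact Or.inl (Or.inr hx)
        · exact Or.inr ⟨d', hd', hx⟩

-- ===== VERDICT (by name: the statement is the Claim_ definition above) =====
theorem extract_top_strings_spec : Claim_equal_extract_top_strings := by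
  intro l _
  show extract_top_strings l = extract_top_strings_alt l
  show PySem.List.sorted (PySem.Set.ofList ((l.foldl (fun d dict => dict.foldl pvStepA d) PySem.Dict.empty).values.flatMap (fun s => s))) (fun s => s) false
     = PySem.List.sorted (l.foldl (fun s dict => dict.foldl pvStepB s) PySem.Set.empty) (fun s => s) false
  rw [PySem.List.sorted_id_eq_sorted_id_iff_perm]
  obtain ⟨hnB, hmB⟩ := pv_outerB l PySem.Set.empty (by simp [PySem.Set.empty])
  rw [List.perm_ext_iff_of_nodup (PySem.Set.nodup_ofList _) hnB]
  intro a
  rw [PySem.Set.mem_ofList, (pv_outerA l PySem.Dict.empty PySem.Dict.nodup_keys_empty).2 a, hmB a]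
  simp [PySem.Dict.empty, PySem.Set.empty, PySem.Dict.values]
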